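-- pv_equiv track=rewrite | github.com/igorsantana/rnn-embeddings | project/models/seq2seq.py | get_unique_songs
-- ===== SOURCE A (Python) =====
-- def get_unique_songs(s_i, s_t):
--     all_i   = set()
--     all_t   = set()
--     for songs in s_i:
--         for song in songs.split():
--             if song not in all_i:
--                 all_i.add(song)
--     for songs in s_t:
--         for song in songs.split():
--             if song not in all_t:
--                 all_t.add(song)
--     return sorted(list(all_i)), sorted(list(all_t))
-- ===== SOURCE B (Python) =====
-- def get_unique_songs(s_i, s_t):
--     def uniq(chunks):
--         toks = []
--         for songs in chunks:
--             for song in songs.split():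
--                 toks.append(song)
--         toks.sort()
--         out = []
--         prev = None
--         for t in toks:
--             if prev != t:
--                 out.append(t)
--                 prev = t
--         return out
--     return uniq(s_i), uniq(s_t)
-- ===== Notes on version B (the rewrite author's own statement) =====
-- stated objective: alternative
-- what changed: Replaces eager hash-set deduplication with collect-all-tokens, sort, then a single adjacent-dedup pass over the sorted list.
import Mathlib
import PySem

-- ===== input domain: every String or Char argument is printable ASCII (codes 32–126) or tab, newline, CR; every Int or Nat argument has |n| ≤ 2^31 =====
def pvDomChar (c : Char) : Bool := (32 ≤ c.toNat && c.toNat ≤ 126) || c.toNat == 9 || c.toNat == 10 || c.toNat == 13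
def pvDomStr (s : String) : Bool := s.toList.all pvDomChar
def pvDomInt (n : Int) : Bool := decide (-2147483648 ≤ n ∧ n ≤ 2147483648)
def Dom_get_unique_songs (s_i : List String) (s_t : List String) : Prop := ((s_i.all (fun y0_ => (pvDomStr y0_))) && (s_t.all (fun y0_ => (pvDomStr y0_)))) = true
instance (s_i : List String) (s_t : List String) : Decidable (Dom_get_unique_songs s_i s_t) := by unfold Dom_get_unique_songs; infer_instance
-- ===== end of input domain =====

-- B collects every token (duplicates kept), sorts, and deduplicates adjacent equals in one pass,
-- instead of A's eager set-based deduplication; alternative algorithm, same asymptotic cost.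

-- ===== PORT A =====
def get_unique_songs (s_i : List String) (s_t : List String) : List String × List String :=
  let all_i := s_i.foldl (fun acc songs =>
      (PySem.Str.split₀ songs).foldl (fun a song =>
        if PySem.Set.contains a song then a else PySem.Set.add a song) acc) PySem.Set.empty
  let all_t := s_t.foldl (fun acc songs =>
      (PySem.Str.split₀ songs).foldl (fun a song =>
        if PySem.Set.contains a song then a else PySem.Set.add a song) acc) PySem.Set.empty
  (PySem.List.sorted all_i (fun x => x) false, PySem.List.sorted all_t (fun x => x) false)

-- ===== PORT B =====
-- one step of B's output loop: emit t only when it differs from the previously emitted token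
def pvDedupStep (st : Option String × List String) (t : String) : Option String × List String :=
  if st.1 ≠ some t then (some t, st.2 ++ [t]) else st

def pvUniq (chunks : List String) : List String :=
  let toks := chunks.foldl (fun acc songs =>
      (PySem.Str.split₀ songs).foldl (fun a song => a ++ [song]) acc) []
  let toks := PySem.List.sorted toks (fun x => x) false
  (toks.foldl pvDedupStep ((none : Option String), ([] : List String))).2

def get_unique_songs_alt (s_i : List String) (s_t : List String) : List String × List String :=
  (pvUniq s_i, pvUniq s_t)

-- ===== PRECONDITION & SPEC =====
def Spec_get_unique_songs (s_i : List String) (s_t : List String) (out : List String × List String) : Prop := out = get_unique_songs_alt s_i s_t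
instance (s_i : List String) (s_t : List String) (out : List String × List String) : Decidable (Spec_get_unique_songs s_i s_t out) := by unfold Spec_get_unique_songs; infer_instance

-- ===== CLAIM (what is proved, stated in full; the proofs are below) =====
def Claim_equal_get_unique_songs : Prop := ∀ (s_i : List String) (s_t : List String), Dom_get_unique_songs s_i s_t → Spec_get_unique_songs s_i s_t (get_unique_songs s_i s_t)

-- ===== LEMMAS AND PROOFS =====

-- A's guarded insertion is exactly Set.add
lemma guard_add (a : PySem.Set String) (s : String) :
    (if PySem.Set.contains a s then a else PySem.Set.add a s) = PySem.Set.add a s := by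
  simp only [PySem.Set.add]
  by_cases h : PySem.Set.contains a s = true
  · rw [if_pos h, if_pos h]
  · rw [if_neg h, if_neg h]

lemma foldl_app (xs : List String) : ∀ acc : List String,
    xs.foldl (fun a s => a ++ [s]) acc = acc ++ xs := by
  induction xs with
  | nil => simp
  | cons x xs ih => intro acc; simp [List.foldl_cons, ih]

-- B's collection loop gathers all tokens in order
lemma collect_eq (chunks : List String) : ∀ acc : List String,
    chunks.foldl (fun acc songs =>
      (PySem.Str.split₀ songs).foldl (fun a song => a ++ [song]) acc) acc
      = acc ++ chunks.flatMap PySem.Str.split₀ := by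
  induction chunks with
  | nil => simp
  | cons c cs ih =>
    intro acc
    rw [List.foldl_cons, foldl_app, ih, List.flatMap_cons, List.append_assoc]

-- A's nested set-building loops fold Set.add over the flattened token list
lemma setfold_eq (chunks : List String) : ∀ s : PySem.Set String,
    chunks.foldl (fun acc songs =>
      (PySem.Str.split₀ songs).foldl PySem.Set.add acc) s
      = (chunks.flatMap PySem.Str.split₀).foldl PySem.Set.add s := by
  induction chunks with
  | nil => simp
  | cons c cs ih => intro s; simp [List.foldl_cons, List.flatMap_cons, List.foldl_append, ih]

-- invariant of B's dedup loop over a (≤)-sorted list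
lemma dedup_go (l : List String) : ∀ (p : Option String) (out : List String),
    l.Pairwise (· ≤ ·) →
    (∀ x ∈ l, ∀ q, p = some q → q ≤ x) →
    out.Pairwise (· < ·) →
    (∀ q, p = some q → q ∈ out ∧ ∀ a ∈ out, a ≤ q) →
    (p = none → out = []) →
    (l.foldl pvDedupStep (p, out)).2.Pairwise (· < ·) ∧
      (∀ x, x ∈ (l.foldl pvDedupStep (p, out)).2 ↔ x ∈ out ∨ x ∈ l) := by
  induction l with
  | nil =>
    intro p out _ _ hout _ _
    refine ⟨hout, by simp⟩
  | cons t l ih =>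
    intro p out hpw hpl hout hpo hpn
    rw [List.foldl_cons]
    rw [List.pairwise_cons] at hpw
    by_cases hc : p = some t
    · have hstep : pvDedupStep (p, out) t = (p, out) := by
        simp [pvDedupStep, hc]
      rw [hstep]
      obtain ⟨htmem, _⟩ := hpo t hc
      have hpl' : ∀ x ∈ l, ∀ q, p = some q → q ≤ x := by
        intro x hx q hq
        rw [hc] at hq
        injection hq with h
        subst h
        exact hpw.1 x hx
      have := ih p out hpw.2 hpl' hout hpo hpn
      refine ⟨this.1, fun x => ?_⟩
      rw [this.2 x]
      constructor
      · rintro (h | h)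
        · exact Or.inl h
        · exact Or.inr (List.mem_cons_of_mem _ h)
      · rintro (h | h)
        · exact Or.inl h
        · rcases List.mem_cons.mp h with rfl | h
          · exact Or.inl htmem
          · exact Or.inr h
    · have hstep : pvDedupStep (p, out) t = (some t, out ++ [t]) := by
        simp [pvDedupStep, hc]
      rw [hstep]
      have hlt : ∀ a ∈ out, a < t := by
        intro a ha
        cases p with
        | none => rw [hpn rfl] at ha; cases ha
        | some q =>
          have haq := (hpo q rfl).2 a ha
          have hqt : q ≤ t := hpl t (by simp) q rfl
          have hne : q ≠ t := fun h => hc (by rw [h])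
          exact lt_of_le_of_lt haq (lt_of_le_of_ne hqt hne)
      have hout' : (out ++ [t]).Pairwise (· < ·) := by
        rw [List.pairwise_append]
        exact ⟨hout, List.pairwise_singleton _ _, by
          intro a ha b hb; rw [List.mem_singleton] at hb; subst hb; exact hlt a ha⟩
      have := ih (some t) (out ++ [t]) hpw.2
        (fun x hx q hq => by cases hq; exact hpw.1 x hx)
        hout'
        (fun q hq => by
          cases hq
          refine ⟨by simp, fun a ha => ?_⟩
          rcases List.mem_append.mp ha with h | h
          · exact le_of_lt (hlt a h)
          · rw [List.mem_singleton] at h; subst h; exact le_refl _)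
        (by intro h; cases h)
      refine ⟨this.1, fun x => ?_⟩
      rw [this.2 x]
      simp [List.mem_append, List.mem_cons]
      tauto

-- per-side equality: sorted set = adjacent-dedup of sorted token list
lemma uniq_eq (chunks : List String) :
    PySem.List.sorted
      (chunks.foldl (fun acc songs =>
        (PySem.Str.split₀ songs).foldl (fun a song =>
          if PySem.Set.contains a song then a else PySem.Set.add a song) acc) PySem.Set.empty)
      (fun x => x) false = pvUniq chunks := by
  have hset :
      chunks.foldl (fun acc songs =>
        (PySem.Str.split₀ songs).foldl (fun a song =>
          if PySem.Set.contains a song then a else PySem.Set.add a song) acc) PySem.Set.empty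
        = PySem.Set.ofList (chunks.flatMap PySem.Str.split₀) := by
    simp only [guard_add]
    rw [PySem.Set.ofList_eq_foldl]
    exact setfold_eq chunks PySem.Set.empty
  rw [hset]
  unfold pvUniq
  rw [collect_eq chunks [], List.nil_append]
  set toks := chunks.flatMap PySem.Str.split₀ with htoks
  have hsortpw : (PySem.List.sorted toks (fun x => x) false).Pairwise (· ≤ ·) := by
    have := PySem.List.sorted_pairwise (xs := toks) (key := fun x => x)
    simpa using this
  obtain ⟨hD, hmem⟩ := dedup_go (PySem.List.sorted toks (fun x => x) false)
    none [] hsortpw (by simp) (by simp) (by simp) (by simp)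
  apply PySem.List.sorted_eq_of_perm_of_pairwise_lt
  · rw [List.perm_ext_iff_of_nodup (List.Pairwise.imp ne_of_lt hD) (PySem.Set.nodup_ofList _)]
    intro x
    rw [hmem x, PySem.Set.mem_ofList]
    simp [PySem.List.mem_sorted]
  · simpa using hD

-- ===== VERDICT (by name: the statement is the Claim_ definition above) =====
theorem get_unique_songs_spec : Claim_equal_get_unique_songs := by
  intro s_i s_t _
  unfold Spec_get_unique_songs get_unique_songs get_unique_songs_alt
  exact Prod.ext_iff.mpr ⟨uniq_eq s_i, uniq_eq s_t⟩
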